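-- pv_equiv track=rewrite | github.com/bustos85/practicas_master_BigData-DataScience | lenguajes/Python/estads.py | maximo_mas
-- ===== SOURCE A (Python) =====
-- def maximo_mas(dicCol, col_num, col_alfa):
--     """ Devuelve el máximo para cada atributo. Para atributos categóricos
--     devolverá el valor que más aparece.
--     Se recorren las columnas del fichero, y para cada una se diferencia entre
--     columnas que albergan números o caracteres alfabéticos. Si todos los
--     valores de la columna son indefinidos, se asigna el caracter ? al valor
--     de esa columna en la salida. """
--     resultado = []
--
--     for i in range(0, len(dicCol)):
--         maximo = ""
--         maximo_veces = 0
--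
--         for j in range(0, len(dicCol[i])):
--             if i in col_num:
--                 if dicCol[i][j] == "?":
--                     pass
--                 elif j == 0 or maximo == "" or dicCol[i][j] > maximo:
--                     maximo = dicCol[i][j]
--             elif i in col_alfa:
--                 if dicCol[i][j] == "?":
--                     pass
--                 else:
--                     numero_veces = dicCol[i].count(dicCol[i][j])
--                     if j == 0 or numero_veces > maximo_veces:
--                         maximo_veces = numero_veces
--                         maximo = dicCol[i][j]
--             else:
--                 maximo = "?"
--
--         resultado.append(maximo)
--
--     return resultado
-- ===== SOURCE B (Python) =====
-- def maximo_mas(dicCol, col_num, col_alfa):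
--     """ Devuelve el maximo para cada atributo (ver a.py).
--     Reimplementacion por ordenacion: las columnas numericas se reducen con
--     max() sobre los valores definidos; para las categoricas se ordenan los
--     pares (valor, indice) de forma estable por valor y un unico barrido
--     detecta las rachas de valores iguales, quedandose con la racha de mayor
--     longitud (y, a igualdad, la de primera aparicion mas temprana). """
--     resultado = []
--     for i, col in enumerate(dicCol):
--         if i in col_num:
--             vals = [v for v in col if v != "?"]
--             resultado.append(max(vals) if vals else "")
--         elif i in col_alfa:
--             pares = [(v, k) for k, v in enumerate(col) if v != "?"]
--             pares.sort(key=lambda p: p[0])  # stable: equal values keep index order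
--             mejor, mejor_cnt, mejor_first = "", 0, 0
--             cur = None  # current run: (valor, cnt, primer indice)
--             for v, k in pares:
--                 if cur is not None and cur[0] == v:
--                     cur = (cur[0], cur[1] + 1, cur[2])
--                 else:
--                     if cur is not None and (cur[1] > mejor_cnt or (cur[1] == mejor_cnt and cur[2] < mejor_first)):
--                         mejor, mejor_cnt, mejor_first = cur
--                     cur = (v, 1, k)
--             if cur is not None and (cur[1] > mejor_cnt or (cur[1] == mejor_cnt and cur[2] < mejor_first)):
--                 mejor, mejor_cnt, mejor_first = cur
--             resultado.append(mejor)
--         else: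
--             resultado.append("?" if col else "")
--     return resultado
-- ===== Notes on version B (the rewrite author's own statement) =====
-- stated objective: faster
-- what changed: Categorical columns are computed by a different algorithm: the (value, index) pairs are stably sorted by value and one run-length scan over the sorted list picks the longest run (earliest first occurrence on ties), replacing A's per-element col.count rescans; numeric columns are reduced with max() over the non-'?' values.
import Mathlib
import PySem

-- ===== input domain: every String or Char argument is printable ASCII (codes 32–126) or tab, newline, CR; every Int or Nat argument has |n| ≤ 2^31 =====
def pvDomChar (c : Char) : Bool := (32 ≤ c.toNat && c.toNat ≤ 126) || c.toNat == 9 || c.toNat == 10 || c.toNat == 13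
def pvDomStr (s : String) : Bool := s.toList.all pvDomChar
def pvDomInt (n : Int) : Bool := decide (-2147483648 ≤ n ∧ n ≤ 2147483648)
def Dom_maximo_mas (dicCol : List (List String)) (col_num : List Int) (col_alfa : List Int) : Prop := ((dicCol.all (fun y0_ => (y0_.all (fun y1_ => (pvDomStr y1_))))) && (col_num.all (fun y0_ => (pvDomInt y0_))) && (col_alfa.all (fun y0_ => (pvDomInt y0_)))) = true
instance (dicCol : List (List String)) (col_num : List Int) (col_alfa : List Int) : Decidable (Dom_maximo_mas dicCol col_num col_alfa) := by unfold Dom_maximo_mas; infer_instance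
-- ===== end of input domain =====

-- B replaces A's per-element col.count rescans by a different algorithm: numeric columns are
-- reduced with max() over the defined values, categorical columns stably sort the (value, index)
-- pairs by value and pick the best run in one run-length scan (objective: faster, measured).

-- ===== PORT A =====
def maximo_mas (dicCol : List (List String)) (col_num : List Int) (col_alfa : List Int) : List String :=
  (PySem.List.pyRange 0 (dicCol.length : Int) 1).foldl
    (fun resultado i =>
      let coli := PySem.List.pyGetD dicCol i []
      let st := (PySem.List.pyRange 0 (coli.length : Int) 1).foldl
        (fun (st : String × Int) j =>
          let maximo := st.1
          let maximo_veces := st.2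
          let v := PySem.List.pyGetD coli j ""
          if col_num.contains i then
            if v == "?" then st
            else if j == 0 || maximo == "" || decide (maximo < v) then (v, maximo_veces)
            else st
          else if col_alfa.contains i then
            if v == "?" then st
            else
              let numero_veces : Int := (coli.count v : Int)
              if j == 0 || decide (maximo_veces < numero_veces) then (v, numero_veces)
              else st
          else ("?", maximo_veces))
        ("", 0)
      resultado ++ [st.1])
    []

-- ===== PORT B =====
-- flush of the current run: keep it if it beats the best (longer, or same length and earlier first index)
def pvMejor (best : String × Int × Int) (cur : Option (String × Int × Int)) : String × Int × Int :=
  match cur with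
  | none => best
  | some c => if best.2.1 < c.2.1 ∨ (c.2.1 = best.2.1 ∧ c.2.2 < best.2.2) then c else best

-- one step of Source B's run-detection loop over the sorted (value, index) pairs
def pvRunStep (st : (String × Int × Int) × Option (String × Int × Int)) (p : String × Int) :
    (String × Int × Int) × Option (String × Int × Int) :=
  match st.2 with
  | some c =>
      if c.1 == p.1 then (st.1, some (c.1, c.2.1 + 1, c.2.2))
      else (pvMejor st.1 (some c), some (p.1, 1, p.2))
  | none => (st.1, some (p.1, 1, p.2))

-- the list comprehension [(v, k) for k, v in enumerate(col) if v != "?"]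
def pvPairs (col : List String) : List (String × Int) :=
  ((PySem.List.enumerate col).filter (fun q => !(q.2 == "?"))).map (fun q => (q.2, q.1))

def pvAltCol (i : Int) (col : List String) (col_num : List Int) (col_alfa : List Int) : String :=
  if col_num.contains i then
    let vals := col.filter (fun v => !(v == "?"))
    (PySem.List.max? vals (fun v => v)).getD ""
  else if col_alfa.contains i then
    let pares := PySem.List.sorted (pvPairs col) (fun p => p.1)
    let fin := pares.foldl pvRunStep (("", 0, 0), none)
    (pvMejor fin.1 fin.2).1
  else if col.isEmpty then "" else "?"

def maximo_mas_alt (dicCol : List (List String)) (col_num : List Int) (col_alfa : List Int) : List String :=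
  (PySem.List.enumerate dicCol 0).foldl
    (fun resultado p => resultado ++ [pvAltCol p.1 p.2 col_num col_alfa]) []

-- ===== PRECONDITION & SPEC =====
def Spec_maximo_mas (dicCol : List (List String)) (col_num : List Int) (col_alfa : List Int) (out : List String) : Prop := out = maximo_mas_alt dicCol col_num col_alfa
instance (dicCol : List (List String)) (col_num : List Int) (col_alfa : List Int) (out : List String) : Decidable (Spec_maximo_mas dicCol col_num col_alfa out) := by unfold Spec_maximo_mas; infer_instance

-- ===== CLAIM (what is proved, stated in full; the proofs are below) =====
def Claim_equal_maximo_mas : Prop := ∀ (dicCol : List (List String)) (col_num : List Int) (col_alfa : List Int), Dom_maximo_mas dicCol col_num col_alfa → Spec_maximo_mas dicCol col_num col_alfa (maximo_mas dicCol col_num col_alfa)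

-- ===== LEMMAS AND PROOFS =====

-- pvPick is the per-value step of A's categorical loop after dedup; pvG the flush comparison of B.
def pvPick (f : String → Int) (st : String × Int) (v : String) : String × Int :=
  if st.2 < f v then (v, f v) else st

lemma pv_prefix_foldl_add (xs : List String) : ∀ (s : List String),
    s <+: xs.foldl PySem.Set.add s := by
  induction xs with
  | nil => intro s; simp
  | cons x xs ih =>
    intro s
    refine List.IsPrefix.trans ?_ (ih (PySem.Set.add s x))
    simp only [PySem.Set.add, PySem.Set.contains]
    split
    · exact List.prefix_refl _
    · exact List.prefix_append _ _

lemma pv_scan_dedup (f : String → Int) :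
    ∀ (xs seen : List String) (st : String × Int), (∀ v ∈ seen, f v ≤ st.2) →
      xs.foldl (pvPick f) st
        = ((xs.foldl PySem.Set.add seen).drop seen.length).foldl (pvPick f) st := by
  intro xs
  induction xs with
  | nil => intro seen st _; simp
  | cons x xs ih =>
    intro seen st h
    simp only [List.foldl_cons]
    by_cases hx : x ∈ seen
    · have hadd : PySem.Set.add seen x = seen := by
        simp [PySem.Set.add, PySem.Set.contains, hx]
      have hst : pvPick f st x = st := by
        simp [pvPick, not_lt.mpr (h x hx)]
      rw [hadd, hst, ih seen st h]
    · have hadd : PySem.Set.add seen x = seen ++ [x] := by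
        simp [PySem.Set.add, PySem.Set.contains, hx]
      rw [hadd]
      have h' : ∀ v ∈ seen ++ [x], f v ≤ (pvPick f st x).2 := by
        intro v hv
        simp only [List.mem_append, List.mem_singleton] at hv
        by_cases hlt : st.2 < f x
        · simp only [pvPick, if_pos hlt]
          rcases hv with hv | rfl
          · exact le_of_lt (lt_of_le_of_lt (h v hv) hlt)
          · exact le_refl _
        · simp only [pvPick, if_neg hlt]
          rcases hv with hv | rfl
          · exact h v hv
          · exact not_lt.mp hlt
      rw [ih (seen ++ [x]) (pvPick f st x) h']
      obtain ⟨r, hr⟩ := pv_prefix_foldl_add xs (seen ++ [x])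
      rw [← hr, List.append_assoc]
      rw [List.drop_left]
      have h2 : (seen ++ [x] ++ r).drop (seen ++ [x]).length = r := List.drop_left
      rw [List.append_assoc] at h2
      rw [h2]
      simp

lemma pv_empty_le (s : String) : "" ≤ s := by
  by_contra h
  push Not at h
  rw [String.lt_iff_toList_lt] at h
  simp at h

-- ---- the numeric branch of A's loop is a running max over the defined values ----
def pvNumBody (st : String × Int) (v : String) : String × Int :=
  if v == "?" then st else if st.1 == "" || decide (st.1 < v) then (v, st.2) else st

def pvNumStep (m v : String) : String := if v == "?" then m else max m v

lemma pv_num_step (m v : String) : (if m == "" || decide (m < v) then v else m) = max m v := by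
  by_cases hm : m = ""
  · subst hm; simp [max_eq_right (pv_empty_le v)]
  · by_cases hlt : m < v
    · simp [hlt, max_eq_right (le_of_lt hlt)]
    · simp [hm, hlt, max_eq_left (not_lt.mp hlt)]

lemma pv_num_pair : ∀ (col : List String) (m : String) (c : Int),
    col.foldl pvNumBody (m, c) = (col.foldl pvNumStep m, c) := by
  intro col
  induction col with
  | nil => intro m c; rfl
  | cons x xs ih =>
    intro m c
    simp only [List.foldl_cons]
    have : pvNumBody (m, c) x = (pvNumStep m x, c) := by
      simp only [pvNumBody, pvNumStep]
      by_cases hq : x == "?"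
      · simp [hq]
      · simp only [hq, Bool.false_eq_true, if_false]
        rw [← pv_num_step m x]
        split <;> rfl
    rw [this, ih]

lemma pv_num_max : ∀ col : List String,
    col.foldl pvNumStep "" =
      (PySem.List.max? (col.filter (fun v => !(v == "?"))) (fun v => v)).getD "" := by
  intro col
  have h1 : (col.filter (fun v => !(v == "?"))).foldl max "" = col.foldl pvNumStep "" := by
    rw [List.foldl_filter]
    apply PySem.List.foldl_congr_mem
    intro acc x _
    simp only [pvNumStep]
    by_cases hq : x == "?" <;> simp [hq]
  rw [← h1]
  cases hf : col.filter (fun v => !(v == "?")) with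
  | nil => rfl
  | cons x t =>
    rw [PySem.List.max?_id_cons]
    simp [max_eq_right (pv_empty_le x)]

-- ---- the categorical branch: A's inner loop body after removing the j == 0 case ----
def pvAlfaBody (coli : List String) (st : String × Int) (v : String) : String × Int :=
  if v == "?" then st
  else if st.2 < (coli.count v : Int) then (v, (coli.count v : Int)) else st

-- triples (value, run length, first index); pvG is B's flush comparison on them
def pvG (b t : String × Int × Int) : String × Int × Int := pvMejor b (some t)

-- the runs of a pair list: value, run length, index carried by the run's first pair
def pvRuns : List (String × Int) → List (String × Int × Int)
  | [] => []
  | (v, k) :: rest =>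
      (v, 1 + ((rest.takeWhile (fun p => p.1 == v)).length : Int), k) ::
        pvRuns (rest.dropWhile (fun p => p.1 == v))
  termination_by l => l.length
  decreasing_by
    simp only [List.length_cons]
    exact Nat.lt_succ_of_le ((List.dropWhile_sublist _).length_le)

lemma pv_machine_ctx : ∀ (ps : List (String × Int)) (best : String × Int × Int) (v : String) (c k : Int),
    pvMejor (ps.foldl pvRunStep (best, some (v, c, k))).1 (ps.foldl pvRunStep (best, some (v, c, k))).2
      = List.foldl pvG best
          ((v, c + ((ps.takeWhile (fun p => p.1 == v)).length : Int), k) ::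
            pvRuns (ps.dropWhile (fun p => p.1 == v))) := by
  intro ps
  induction ps with
  | nil =>
    intro best v c k
    simp [pvRuns, pvG]
  | cons q rest ih =>
    intro best v c k
    obtain ⟨w, j⟩ := q
    simp only [List.foldl_cons]
    by_cases hw : w = v
    · subst hw
      have hstep : pvRunStep (best, some (w, c, k)) (w, j) = (best, some (w, c + 1, k)) := by
        simp [pvRunStep]
      rw [hstep, ih]
      have ht : List.takeWhile (fun p => p.1 == w) ((w, j) :: rest)
          = (w, j) :: List.takeWhile (fun p => p.1 == w) rest := by
        simp
      have hd : List.dropWhile (fun p => p.1 == w) ((w, j) :: rest)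
          = List.dropWhile (fun p => p.1 == w) rest := by
        simp
      have harg : (c + 1) + ((List.takeWhile (fun p => p.1 == w) rest).length : Int)
          = c + ((((w, j) :: List.takeWhile (fun p => p.1 == w) rest)).length : Int) := by
        simp only [List.length_cons, Nat.cast_add, Nat.cast_one]; ring
      rw [ht, hd, harg, List.foldl_cons]
    · have hstep : pvRunStep (best, some (v, c, k)) (w, j)
          = (pvG best (v, c, k), some (w, 1, j)) := by
        have hvw : (v == w) = false := by simpa using fun h => hw h.symm
        simp [pvRunStep, pvG, hvw]
      rw [hstep, ih]
      have ht : List.takeWhile (fun p => p.1 == v) ((w, j) :: rest) = [] := by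
        simp [hw]
      have hd : List.dropWhile (fun p => p.1 == v) ((w, j) :: rest) = (w, j) :: rest := by
        simp [hw]
      rw [ht, hd]
      simp only [List.length_nil, Nat.cast_zero, add_zero]
      rw [pvRuns]

lemma pv_machine_eq (ps : List (String × Int)) (best : String × Int × Int) :
    pvMejor (ps.foldl pvRunStep (best, none)).1 (ps.foldl pvRunStep (best, none)).2
      = List.foldl pvG best (pvRuns ps) := by
  cases ps with
  | nil => simp [pvRuns, pvMejor]
  | cons q rest =>
    obtain ⟨v, k⟩ := q
    have hstep : pvRunStep (best, none) (v, k) = (best, some (v, 1, k)) := by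
      simp [pvRunStep]
    simp only [List.foldl_cons, hstep]
    rw [pv_machine_ctx]
    rw [pvRuns]

lemma pv_drop_ne (v : String) (k : Int) (rest : List (String × Int))
    (hp : List.Pairwise (fun a b => a.1 ≤ b.1) ((v, k) :: rest)) :
    ∀ p ∈ rest.dropWhile (fun p => p.1 == v), ¬ p.1 = v := by
  intro p hpmem
  cases hdq : rest.dropWhile (fun p => p.1 == v) with
  | nil => rw [hdq] at hpmem; simp at hpmem
  | cons q t =>
    rw [hdq] at hpmem
    have hqrest : q ∈ rest := (List.dropWhile_sublist _).mem (by rw [hdq]; exact List.mem_cons_self)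
    have hqv : ¬ q.1 = v := by
      have h := List.head?_dropWhile_not (fun p => p.1 == v) rest
      rw [hdq] at h
      simpa using h
    have hvq : v < q.1 := lt_of_le_of_ne (List.rel_of_pairwise_cons hp hqrest) (fun h => hqv h.symm)
    have hpd : List.Pairwise (fun a b => a.1 ≤ b.1) (q :: t) := by
      rw [← hdq]
      exact List.Pairwise.sublist (List.dropWhile_sublist _) hp.of_cons
    rcases List.mem_cons.mp hpmem with rfl | hpt
    · exact hqv
    · intro hcontra
      have : q.1 ≤ p.1 := List.rel_of_pairwise_cons hpd hpt
      rw [hcontra] at this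
      exact absurd (lt_of_lt_of_le hvq this) (lt_irrefl v)

lemma pv_filter_head_run (v : String) (k : Int) (rest : List (String × Int))
    (hp : List.Pairwise (fun a b => a.1 ≤ b.1) ((v, k) :: rest)) :
    ((v, k) :: rest).filter (fun p => p.1 == v) = (v, k) :: rest.takeWhile (fun p => p.1 == v) := by
  rw [List.filter_cons]
  simp only [beq_self_eq_true, if_pos]
  congr 1
  conv_lhs => rw [← List.takeWhile_append_dropWhile (p := fun p => p.1 == v) (l := rest)]
  rw [List.filter_append]
  have h1 : (rest.takeWhile (fun p => p.1 == v)).filter (fun p => p.1 == v)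
      = rest.takeWhile (fun p => p.1 == v) :=
    List.filter_eq_self.mpr (fun a ha => by exact List.mem_takeWhile_imp (p := fun (p : String × Int) => (p.1 == v)) ha)
  have h2 : (rest.dropWhile (fun p => p.1 == v)).filter (fun p => p.1 == v) = [] :=
    List.filter_eq_nil_iff.mpr (fun a ha => by simpa using pv_drop_ne v k rest hp a ha)
  rw [h1, h2, List.append_nil]

lemma pv_filter_other (v : String) (k : Int) (rest : List (String × Int)) (w : String) (hw : ¬ w = v) :
    ((v, k) :: rest).filter (fun p => p.1 == w)
      = (rest.dropWhile (fun p => p.1 == v)).filter (fun p => p.1 == w) := by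
  rw [List.filter_cons]
  have hvw : ((v, k).1 == w) = false := by simpa using fun h => hw h.symm
  rw [hvw]
  simp only [Bool.false_eq_true, if_false]
  conv_lhs => rw [← List.takeWhile_append_dropWhile (p := fun p => p.1 == v) (l := rest)]
  rw [List.filter_append]
  have h1 : (rest.takeWhile (fun p => p.1 == v)).filter (fun p => p.1 == w) = [] := by
    refine List.filter_eq_nil_iff.mpr (fun a ha => ?_)
    have hav : a.1 = v := by simpa using (List.mem_takeWhile_imp (p := fun (p : String × Int) => (p.1 == v)) ha)
    have hvw2 : ¬ v = w := fun h => hw h.symm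
    simp [hav, hvw2]
  rw [h1, List.nil_append]

lemma pv_runs_fst_mem : ∀ (ys : List (String × Int)) (t : String × Int × Int),
    t ∈ pvRuns ys → t.1 ∈ ys.map (fun p => p.1) := by
  intro ys
  induction ys using pvRuns.induct with
  | case1 => intro t ht; simp [pvRuns] at ht
  | case2 v k rest ih =>
    intro t ht
    rw [pvRuns] at ht
    rcases List.mem_cons.mp ht with rfl | ht'
    · simp
    · have := ih t ht'
      have hsub : ((rest.dropWhile (fun p => p.1 == v)).map (fun p => p.1)).Sublist
          (rest.map (fun p => p.1)) := (List.dropWhile_sublist _).map _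
      simp only [List.map_cons]
      exact List.mem_cons_of_mem _ (hsub.mem this)

lemma pv_runs_canon : ∀ (ys : List (String × Int)),
    List.Pairwise (fun a b => a.1 ≤ b.1) ys →
    ∀ t ∈ pvRuns ys,
      ((ys.filter (fun p => p.1 == t.1)).length : Int) = t.2.1 ∧
      (ys.filter (fun p => p.1 == t.1)).head? = some (t.1, t.2.2) := by
  intro ys
  induction ys using pvRuns.induct with
  | case1 => intro _ t ht; simp [pvRuns] at ht
  | case2 v k rest ih =>
    intro hp t ht
    rw [pvRuns] at ht
    rcases List.mem_cons.mp ht with rfl | ht'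
    · rw [pv_filter_head_run v k rest hp]
      refine ⟨?_, rfl⟩
      simp only [List.length_cons]
      push_cast
      ring
    · have hne : ¬ t.1 = v := by
        have := pv_runs_fst_mem _ t ht'
        obtain ⟨p, hpmem, hpeq⟩ := List.mem_map.mp this
        rw [← hpeq]
        exact pv_drop_ne v k rest hp p hpmem
      rw [pv_filter_other v k rest t.1 hne]
      exact ih (List.Pairwise.sublist (List.dropWhile_sublist _) hp.of_cons) t ht'

lemma pv_runs_fst_iff : ∀ (ys : List (String × Int)),
    List.Pairwise (fun a b => a.1 ≤ b.1) ys →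
    ∀ v, (v ∈ (pvRuns ys).map (fun t => t.1) ↔ v ∈ ys.map (fun p => p.1)) := by
  intro ys
  induction ys using pvRuns.induct with
  | case1 => intro _ v; simp [pvRuns]
  | case2 v k rest ih =>
    intro hp w
    rw [pvRuns]
    simp only [List.map_cons, List.mem_cons]
    by_cases hw : w = v
    · simp [hw]
    · have hiff := ih (List.Pairwise.sublist (List.dropWhile_sublist _) hp.of_cons) w
      simp only [hw, false_or]
      rw [hiff]
      conv_rhs => rw [← List.takeWhile_append_dropWhile (p := fun p => p.1 == v) (l := rest)]
      rw [List.map_append, List.mem_append]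
      have hnt : w ∉ (rest.takeWhile (fun p => p.1 == v)).map (fun p => p.1) := by
        intro hmem
        obtain ⟨p, hpmem, hpeq⟩ := List.mem_map.mp hmem
        have hpv : p.1 = v := by
          simpa using List.mem_takeWhile_imp (p := fun (p : String × Int) => (p.1 == v)) hpmem
        exact hw (by rw [← hpeq, hpv])
      simp [hnt]

lemma pv_runs_fst_nodup : ∀ (ys : List (String × Int)),
    List.Pairwise (fun a b => a.1 ≤ b.1) ys →
    ((pvRuns ys).map (fun t => t.1)).Nodup := by
  intro ys
  induction ys using pvRuns.induct with
  | case1 => intro _; simp [pvRuns]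
  | case2 v k rest ih =>
    intro hp
    rw [pvRuns]
    simp only [List.map_cons, List.nodup_cons]
    refine ⟨?_, ih (List.Pairwise.sublist (List.dropWhile_sublist _) hp.of_cons)⟩
    intro hmem
    obtain ⟨t, htmem, hteq⟩ := List.mem_map.mp hmem
    have := pv_runs_fst_mem _ t htmem
    obtain ⟨p, hpmem, hpeq⟩ := List.mem_map.mp this
    exact pv_drop_ne v k rest hp p hpmem (by rw [hpeq, hteq])

lemma pv_filter_insertBy (x : String × Int) (ys : List (String × Int)) (v : String)
    (hp : List.Pairwise (fun a b => a.1 ≤ b.1) ys) :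
    (PySem.List.insertBy (fun a b => decide (a.1 < b.1)) x ys).filter (fun p => p.1 == v)
      = if x.1 == v then ys.filter (fun p => p.1 == v) ++ [x] else ys.filter (fun p => p.1 == v) := by
  induction ys with
  | nil =>
    simp only [PySem.List.insertBy, List.filter_nil]
    by_cases hx : x.1 = v
    · simp [hx]
    · simp [hx]
  | cons y ys ih =>
    rw [PySem.List.insertBy]
    by_cases hlt : x.1 < y.1
    · simp only [hlt, decide_true, if_true]
      by_cases hx : x.1 = v
      · have hfilt : (y :: ys).filter (fun p => p.1 == v) = [] := by
          refine List.filter_eq_nil_iff.mpr (fun a ha => ?_)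
          have hya : y.1 ≤ a.1 := by
            rcases List.mem_cons.mp ha with rfl | ha'
            · exact le_refl _
            · exact List.rel_of_pairwise_cons hp ha'
          have : v < a.1 := lt_of_lt_of_le (hx ▸ hlt) hya
          simp only [beq_iff_eq]
          intro hav
          rw [hav] at this
          exact lt_irrefl v this
        rw [List.filter_cons]
        simp only [hx, beq_self_eq_true, if_pos]
        rw [hfilt]
        simp
      · rw [List.filter_cons]
        have : (x.1 == v) = false := by simpa using hx
        simp [this]
    · simp only [hlt, decide_false, Bool.false_eq_true, if_false]
      rw [List.filter_cons, List.filter_cons, ih hp.of_cons]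
      by_cases hy : y.1 = v <;> by_cases hx : x.1 = v <;>
        simp [hy, hx]

lemma pv_filter_foldl_insertBy : ∀ (xs acc : List (String × Int)) (v : String),
    List.Pairwise (fun a b => a.1 ≤ b.1) acc →
    (xs.foldl (fun acc x => PySem.List.insertBy (fun a b => decide (a.1 < b.1)) x acc) acc).filter
        (fun p => p.1 == v)
      = acc.filter (fun p => p.1 == v) ++ xs.filter (fun p => p.1 == v) := by
  intro xs
  induction xs with
  | nil => intro acc v _; simp
  | cons x xs ih =>
    intro acc v hp
    simp only [List.foldl_cons]
    have hins : List.Pairwise (fun (a b : String × Int) => a.1 ≤ b.1)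
        (PySem.List.insertBy (fun a b => decide (a.1 < b.1)) x acc) :=
      PySem.List.insertBy_pairwise_le (fun p => p.1) x acc hp
    rw [ih _ v hins, pv_filter_insertBy x acc v hp, List.filter_cons]
    by_cases hx : x.1 = v
    · simp [hx]
    · have : (x.1 == v) = false := by simpa using hx
      simp [this]

lemma pv_filter_sorted (xs : List (String × Int)) (v : String) :
    (PySem.List.sorted xs (fun p => p.1)).filter (fun p => p.1 == v) = xs.filter (fun p => p.1 == v) := by
  rw [PySem.List.sorted_eq_foldl_insertBy]
  simpa using pv_filter_foldl_insertBy xs [] v (by simp)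

def pvFo : List (String × Int) → List String → List (String × Int)
  | [], _ => []
  | p :: t, seen =>
      if PySem.Set.contains seen p.1 then pvFo t seen
      else p :: pvFo t (PySem.Set.add seen p.1)

lemma pv_fo_map_fst : ∀ (ps : List (String × Int)) (seen : List String),
    (pvFo ps seen).map (fun p => p.1) = ((ps.map (fun p => p.1)).foldl PySem.Set.add seen).drop seen.length := by
  intro ps
  induction ps with
  | nil => intro seen; simp [pvFo]
  | cons p t ih =>
    intro seen
    rw [pvFo]
    simp only [List.map_cons, List.foldl_cons]
    by_cases hx : PySem.Set.contains seen p.1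
    · have hadd : PySem.Set.add seen p.1 = seen := by
        simp only [PySem.Set.add]
        rw [if_pos hx]
      rw [if_pos hx, hadd, ih]
    · have hadd : PySem.Set.add seen p.1 = seen ++ [p.1] := by
        simp only [PySem.Set.add]
        rw [if_neg hx]
      rw [if_neg hx, hadd]
      simp only [List.map_cons]
      rw [ih (seen ++ [p.1])]
      obtain ⟨r, hr⟩ := pv_prefix_foldl_add (t.map (fun p => p.1)) (seen ++ [p.1])
      rw [← hr]
      have h1 : ((seen ++ [p.1]) ++ r).drop (seen ++ [p.1]).length = r := List.drop_left
      have h2 : ((seen ++ [p.1]) ++ r).drop seen.length = p.1 :: r := by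
        rw [List.append_assoc, List.drop_left' rfl]
        rfl
      rw [h1, h2]

lemma pv_fo_sublist : ∀ (ps : List (String × Int)) (seen : List String), (pvFo ps seen).Sublist ps := by
  intro ps
  induction ps with
  | nil => intro seen; simp [pvFo]
  | cons p t ih =>
    intro seen
    rw [pvFo]
    split
    · exact (ih seen).cons _
    · exact (ih _).cons₂ _

lemma pv_fo_first : ∀ (ps : List (String × Int)) (seen : List String) (p : String × Int),
    p ∈ pvFo ps seen → ¬ PySem.Set.contains seen p.1 = true ∧ (ps.filter (fun q => q.1 == p.1)).head? = some p := by
  intro ps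
  induction ps with
  | nil => intro seen p hp; simp [pvFo] at hp
  | cons q t ih =>
    intro seen p hp
    rw [pvFo] at hp
    by_cases hq : PySem.Set.contains seen q.1
    · rw [if_pos hq] at hp
      obtain ⟨hns, hh⟩ := ih seen p hp
      have hpq : ¬ q.1 = p.1 := by
        intro h
        rw [h] at hq
        exact hns hq
      refine ⟨hns, ?_⟩
      rw [List.filter_cons]
      have : (q.1 == p.1) = false := by simpa using hpq
      rw [this]
      simpa using hh
    · rw [if_neg hq] at hp
      rcases List.mem_cons.mp hp with rfl | hp'
      · refine ⟨hq, ?_⟩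
        rw [List.filter_cons]
        simp
      · obtain ⟨hns, hh⟩ := ih _ p hp'
        have hadd : PySem.Set.add seen q.1 = seen ++ [q.1] := by
          simp only [PySem.Set.add]
          rw [if_neg hq]
        rw [hadd] at hns
        have hmem : ∀ y, PySem.Set.contains (seen ++ [q.1]) y = true ↔ (y = q.1 ∨ PySem.Set.contains seen y = true) := by
          intro y
          simp [PySem.Set.contains]
          tauto
        have hpq : ¬ p.1 = q.1 := fun h => hns ((hmem p.1).mpr (Or.inl h))
        have hseen : ¬ PySem.Set.contains seen p.1 = true := fun h => hns ((hmem p.1).mpr (Or.inr h))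
        refine ⟨hseen, ?_⟩
        rw [List.filter_cons]
        have : (q.1 == p.1) = false := by simpa using fun h => hpq h.symm
        rw [this]
        simpa using hh

lemma pv_bridgeA : ∀ (ts : List (String × Int × Int)) (b : String × Int × Int),
    (∀ t ∈ ts, 1 ≤ t.2.1) → ts.Pairwise (fun a c => a.2.2 < c.2.2) →
    (b.2.1 = 0 ∨ ∀ t ∈ ts, b.2.2 < t.2.2) →
    ts.foldl (fun (s : String × Int) t => if s.2 < t.2.1 then (t.1, t.2.1) else s) (b.1, b.2.1)
      = ((ts.foldl pvG b).1, (ts.foldl pvG b).2.1) := by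
  intro ts
  induction ts with
  | nil => intro b _ _ _; rfl
  | cons t ts ih =>
    intro b h1 h2 h3
    simp only [List.foldl_cons]
    have ht1 : 1 ≤ t.2.1 := h1 t List.mem_cons_self
    by_cases hbt : b.2.1 < t.2.1
    · have hG : pvG b t = t := by
        simp only [pvG, pvMejor]
        rw [if_pos (Or.inl hbt)]
      have hS : (if (b.1, b.2.1).2 < t.2.1 then (t.1, t.2.1) else (b.1, b.2.1)) = (t.1, t.2.1) := by
        rw [if_pos hbt]
      rw [hS, hG]
      exact ih t (fun r hr => h1 r (List.mem_cons_of_mem _ hr)) h2.of_cons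
        (Or.inr (fun r hr => List.rel_of_pairwise_cons h2 hr))
    · have hnt : ¬ (b.2.1 < t.2.1 ∨ (t.2.1 = b.2.1 ∧ t.2.2 < b.2.2)) := by
        rcases h3 with h3 | h3
        · intro h
          rcases h with h | ⟨heq, _⟩
          · exact hbt h
          · rw [h3] at heq; omega
        · intro h
          rcases h with h | ⟨_, hlt⟩
          · exact hbt h
          · exact absurd (h3 t List.mem_cons_self) (not_lt.mpr (le_of_lt hlt))
      have hG : pvG b t = b := by
        simp only [pvG, pvMejor]
        rw [if_neg hnt]
      have hS : (if (b.1, b.2.1).2 < t.2.1 then (t.1, t.2.1) else (b.1, b.2.1)) = (b.1, b.2.1) := by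
        rw [if_neg hbt]
      rw [hS, hG]
      refine ih b (fun r hr => h1 r (List.mem_cons_of_mem _ hr)) h2.of_cons ?_
      rcases h3 with h3 | h3
      · exact Or.inl h3
      · exact Or.inr (fun r hr => h3 r (List.mem_cons_of_mem _ hr))

lemma pv_G_comm (x y : String × Int × Int)
    (h : x.2.1 = y.2.1 → x.2.2 = y.2.2 → x = y) :
    ∀ z, pvG (pvG z x) y = pvG (pvG z y) x := by
  intro z
  by_cases hxy : x = y
  · rw [hxy]
  · have hk : ¬ (x.2.1 = y.2.1 ∧ x.2.2 = y.2.2) := fun ⟨h1, h2⟩ => hxy (h h1 h2)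
    obtain ⟨x1, xc, xf⟩ := x
    obtain ⟨y1, yc, yf⟩ := y
    obtain ⟨z1, zc, zf⟩ := z
    simp only [pvG, pvMejor]
    dsimp only at hk ⊢
    split_ifs <;> (dsimp only at *) <;>
      first
        | rfl
        | (exfalso; omega)

lemma pv_pairs_fst (coli : List String) :
    (pvPairs coli).map (fun p => p.1) = coli.filter (fun v => !(v == "?")) := by
  unfold pvPairs
  rw [List.map_map]
  have h1 : ((fun (p : Int × String) => (p.2, p.1)) ∘ (fun q => q)) = (fun (p : Int × String) => (p.2, p.1)) := rfl
  have : ((fun (p : String × Int) => p.1) ∘ (fun (q : Int × String) => (q.2, q.1))) = (fun (q : Int × String) => q.2) := rfl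
  rw [this]
  have h2 : (fun (q : Int × String) => !(q.2 == "?")) = ((fun v => !(v == "?")) ∘ (fun (q : Int × String) => q.2)) := rfl
  rw [h2, ← List.filter_map]
  rw [PySem.List.map_snd_enumerate]

lemma pv_pairs_idx (coli : List String) :
    (pvPairs coli).Pairwise (fun a b => a.2 < b.2) := by
  unfold pvPairs
  rw [List.pairwise_map]
  have := PySem.List.pairwise_lt_enumerate coli 0
  exact List.Pairwise.sublist List.filter_sublist this

def pvCanon (coli : List String) (t : String × Int × Int) : Prop :=
  t.1 ∈ coli.filter (fun v => !(v == "?"))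
  ∧ t.2.1 = (((pvPairs coli).filter (fun p => p.1 == t.1)).length : Int)
  ∧ ((pvPairs coli).filter (fun p => p.1 == t.1)).head? = some (t.1, t.2.2)

lemma pv_canon_uniq (coli : List String) (t t' : String × Int × Int)
    (h : pvCanon coli t) (h' : pvCanon coli t') (h1 : t.1 = t'.1) : t = t' := by
  obtain ⟨_, hc, hh⟩ := h
  obtain ⟨_, hc', hh'⟩ := h'
  rw [h1] at hc hh
  rw [hh'] at hh
  have h2 : t.2.2 = t'.2.2 := by
    have := Option.some.inj hh
    exact ((Prod.mk.injEq _ _ _ _ ▸ this).2).symm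
  have h3 : t.2.1 = t'.2.1 := by rw [hc, hc']
  calc t = (t.1, t.2.1, t.2.2) := rfl
    _ = (t'.1, t'.2.1, t'.2.2) := by rw [h1, h2, h3]
    _ = t' := rfl

lemma pv_count_len (coli : List String) (v : String) (hv : v ∈ coli.filter (fun v => !(v == "?"))) :
    (coli.count v : Int) = (((pvPairs coli).filter (fun p => p.1 == v)).length : Int) := by
  have hpred : (!(v == "?")) = true := (List.mem_filter.mp hv).2
  have h1 : coli.count v = (coli.filter (fun v => !(v == "?"))).count v :=
    (List.count_filter (p := fun v => !(v == "?")) (a := v) (l := coli) hpred).symm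
  rw [h1, ← pv_pairs_fst, List.count_eq_countP, List.countP_map, List.countP_eq_length_filter]
  rfl

lemma pv_canon_ts (coli : List String) :
    ∀ p ∈ pvFo (pvPairs coli) [], pvCanon coli (p.1, (coli.count p.1 : Int), p.2) := by
  intro p hp
  have hmem : p ∈ pvPairs coli := (pv_fo_sublist (pvPairs coli) []).mem hp
  have hfst : p.1 ∈ coli.filter (fun v => !(v == "?")) := by
    rw [← pv_pairs_fst]
    exact List.mem_map.mpr ⟨p, hmem, rfl⟩
  refine ⟨hfst, pv_count_len coli p.1 hfst, ?_⟩
  have := (pv_fo_first (pvPairs coli) [] p hp).2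
  simpa using this

lemma pv_canon_rs (coli : List String) :
    ∀ t ∈ pvRuns (PySem.List.sorted (pvPairs coli) (fun p => p.1)), pvCanon coli t := by
  intro t ht
  have hss_pair : (PySem.List.sorted (pvPairs coli) (fun p => p.1)).Pairwise (fun a b => a.1 ≤ b.1) :=
    PySem.List.sorted_pairwise (pvPairs coli) (fun p => p.1)
  have hcan := pv_runs_canon _ hss_pair t ht
  have hstab := pv_filter_sorted (pvPairs coli) t.1
  have hfst : t.1 ∈ coli.filter (fun v => !(v == "?")) := by
    have h1 := pv_runs_fst_mem _ t ht
    have hperm : (PySem.List.sorted (pvPairs coli) (fun p => p.1)).Perm (pvPairs coli) :=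
      PySem.List.sorted_perm _ _ _
    rw [← pv_pairs_fst]
    exact (hperm.map (fun p => p.1)).mem_iff.mp h1
  exact ⟨hfst, by rw [← hstab]; exact hcan.1.symm, by rw [← hstab]; exact hcan.2⟩

lemma pv_cat_eq (coli : List String) :
    (coli.foldl (pvAlfaBody coli) ("", 0)).1 =
      (let pares := PySem.List.sorted (pvPairs coli) (fun p => p.1)
       let fin := pares.foldl pvRunStep (("", 0, 0), none)
       (pvMejor fin.1 fin.2).1) := by
  -- A side: the loop is the strict-count fold over the first-occurrence list
  have hL : coli.foldl (pvAlfaBody coli) ("", 0)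
      = (coli.filter (fun v => !(v == "?"))).foldl (pvPick (fun v => (coli.count v : Int))) ("", 0) := by
    rw [List.foldl_filter]
    apply PySem.List.foldl_congr_mem
    intro acc x _
    simp only [pvAlfaBody, pvPick]
    by_cases hq : x == "?" <;> simp [hq]
  have hD : (coli.filter (fun v => !(v == "?"))).foldl (pvPick (fun v => (coli.count v : Int))) ("", 0)
      = (PySem.Set.ofList (coli.filter (fun v => !(v == "?")))).foldl
          (pvPick (fun v => (coli.count v : Int))) ("", 0) := by
    rw [pv_scan_dedup (fun v => (coli.count v : Int)) _ [] ("", 0) (by simp)]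
    simp only [List.length_nil, List.drop_zero, ← PySem.Set.ofList_eq_foldl]
  have hF_fst : (pvFo (pvPairs coli) []).map (fun p => p.1)
      = PySem.Set.ofList (coli.filter (fun v => !(v == "?"))) := by
    rw [pv_fo_map_fst, pv_pairs_fst]
    simp [← PySem.Set.ofList_eq_foldl]
  -- the strict fold over first-occurrence values as a fold over triples
  have hA1 : (PySem.Set.ofList (coli.filter (fun v => !(v == "?")))).foldl
        (pvPick (fun v => (coli.count v : Int))) ("", 0)
      = ((pvFo (pvPairs coli) []).map (fun p => (p.1, (coli.count p.1 : Int), p.2))).foldl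
          (fun (s : String × Int) t => if s.2 < t.2.1 then (t.1, t.2.1) else s) ("", 0) := by
    rw [← hF_fst, List.foldl_map, List.foldl_map]
    simp only [pvPick]
  -- B side: the run machine is the pvG-fold over the runs of the sorted pairs
  have hB : (let pares := PySem.List.sorted (pvPairs coli) (fun p => p.1)
             let fin := pares.foldl pvRunStep (("", 0, 0), none)
             (pvMejor fin.1 fin.2).1)
      = (List.foldl pvG ("", 0, 0) (pvRuns (PySem.List.sorted (pvPairs coli) (fun p => p.1)))).1 := by
    show (pvMejor ((PySem.List.sorted (pvPairs coli) (fun p => p.1)).foldl pvRunStep (("", 0, 0), none)).1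
        ((PySem.List.sorted (pvPairs coli) (fun p => p.1)).foldl pvRunStep (("", 0, 0), none)).2).1 = _
    rw [pv_machine_eq]
  -- the two triple lists are permutations of each other
  have hnod_ts : ((pvFo (pvPairs coli) []).map (fun p => (p.1, (coli.count p.1 : Int), p.2))).Nodup := by
    apply List.Nodup.of_map (f := fun (t : String × Int × Int) => t.1)
    rw [List.map_map]
    have : ((fun (t : String × Int × Int) => t.1) ∘ (fun (p : String × Int) => (p.1, (coli.count p.1 : Int), p.2)))
        = (fun (p : String × Int) => p.1) := rfl
    rw [this, hF_fst]
    exact PySem.Set.nodup_ofList _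
  have hss_pair : (PySem.List.sorted (pvPairs coli) (fun p => p.1)).Pairwise (fun a b => a.1 ≤ b.1) :=
    PySem.List.sorted_pairwise (pvPairs coli) (fun p => p.1)
  have hnod_rs : (pvRuns (PySem.List.sorted (pvPairs coli) (fun p => p.1))).Nodup :=
    List.Nodup.of_map _ (pv_runs_fst_nodup _ hss_pair)
  have hts_canon : ∀ t ∈ (pvFo (pvPairs coli) []).map (fun p => (p.1, (coli.count p.1 : Int), p.2)),
      pvCanon coli t := by
    intro t ht
    obtain ⟨p, hp, rfl⟩ := List.mem_map.mp ht
    exact pv_canon_ts coli p hp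
  have hssperm : (PySem.List.sorted (pvPairs coli) (fun p => p.1)).Perm (pvPairs coli) :=
    PySem.List.sorted_perm _ _ _
  have hmemiff : ∀ t, t ∈ (pvFo (pvPairs coli) []).map (fun p => (p.1, (coli.count p.1 : Int), p.2))
      ↔ t ∈ pvRuns (PySem.List.sorted (pvPairs coli) (fun p => p.1)) := by
    intro t
    constructor
    · intro ht
      have hc := hts_canon t ht
      have hfst : t.1 ∈ (PySem.List.sorted (pvPairs coli) (fun p => p.1)).map (fun p => p.1) := by
        rw [(hssperm.map (fun p => p.1)).mem_iff, pv_pairs_fst]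
        exact hc.1
      have := (pv_runs_fst_iff _ hss_pair t.1).mpr hfst
      obtain ⟨r, hr, hreq⟩ := List.mem_map.mp this
      have : r = t := pv_canon_uniq coli r t (pv_canon_rs coli r hr) hc hreq
      rw [← this]
      exact hr
    · intro ht
      have hc := pv_canon_rs coli t ht
      have hfst : t.1 ∈ (pvFo (pvPairs coli) []).map (fun p => p.1) := by
        rw [hF_fst, PySem.Set.mem_ofList]
        exact hc.1
      obtain ⟨p, hp, hpeq⟩ := List.mem_map.mp hfst
      have hcp := pv_canon_ts coli p hp
      have : (p.1, (coli.count p.1 : Int), p.2) = t :=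
        pv_canon_uniq coli _ t hcp hc hpeq
      rw [← this]
      exact List.mem_map.mpr ⟨p, hp, rfl⟩
  have hperm : ((pvFo (pvPairs coli) []).map (fun p => (p.1, (coli.count p.1 : Int), p.2))).Perm
      (pvRuns (PySem.List.sorted (pvPairs coli) (fun p => p.1))) :=
    (List.perm_ext_iff_of_nodup hnod_ts hnod_rs).mpr hmemiff
  -- the comparison is left-commutative on these triples
  have hidx_nodup : ((pvPairs coli).map (fun p => p.2)).Nodup := by
    have := pv_pairs_idx coli
    have h2 : ((pvPairs coli).map (fun p => p.2)).Pairwise (· < ·) := List.pairwise_map.mpr this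
    exact h2.imp (fun hlt => ne_of_lt hlt)
  have hcomm : ∀ x ∈ (pvFo (pvPairs coli) []).map (fun p => (p.1, (coli.count p.1 : Int), p.2)),
      ∀ y ∈ (pvFo (pvPairs coli) []).map (fun p => (p.1, (coli.count p.1 : Int), p.2)),
      ∀ z, pvG (pvG z x) y = pvG (pvG z y) x := by
    intro x hx y hy z
    refine pv_G_comm x y (fun hc hf => ?_) z
    have hcx := hts_canon x hx
    have hcy := hts_canon y hy
    have hx2 : (x.1, x.2.2) ∈ pvPairs coli :=
      List.mem_of_mem_filter (List.mem_of_mem_head? hcx.2.2)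
    have hy2 : (y.1, y.2.2) ∈ pvPairs coli :=
      List.mem_of_mem_filter (List.mem_of_mem_head? hcy.2.2)
    have hpair : ((x.1, x.2.2) : String × Int) = (y.1, y.2.2) :=
      List.inj_on_of_nodup_map hidx_nodup hx2 hy2 (by simpa using hf)
    have hfst : x.1 = y.1 := (Prod.mk.injEq _ _ _ _ ▸ hpair).1
    exact pv_canon_uniq coli x y hcx hcy hfst
  -- assemble
  show (coli.foldl (pvAlfaBody coli) ("", 0)).1 = _
  rw [hL, hD, hA1, hB]
  rw [pv_bridgeA _ ("", 0, 0) ?h1 ?h2 (Or.inl rfl)]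
  · rw [List.Perm.foldl_eq' hperm hcomm (("", 0, 0) : String × Int × Int)]
  case h1 =>
    intro t ht
    obtain ⟨p, hp, rfl⟩ := List.mem_map.mp ht
    have hmem : p ∈ pvPairs coli := (pv_fo_sublist (pvPairs coli) []).mem hp
    have hfst : p.1 ∈ coli.filter (fun v => !(v == "?")) := by
      rw [← pv_pairs_fst]
      exact List.mem_map.mpr ⟨p, hmem, rfl⟩
    have : 0 < coli.count p.1 := List.count_pos_iff.mpr (List.mem_of_mem_filter hfst)
    simpa using this
  case h2 =>
    apply List.pairwise_map.mpr
    exact List.Pairwise.sublist (pv_fo_sublist (pvPairs coli) []) (pv_pairs_idx coli)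

-- ---- per-column equality and the verdict ----
def pvInner (i : Int) (coli : List String) (col_num : List Int) (col_alfa : List Int) : String × Int :=
  (PySem.List.pyRange 0 (coli.length : Int) 1).foldl
    (fun (st : String × Int) j =>
      let maximo := st.1
      let maximo_veces := st.2
      let v := PySem.List.pyGetD coli j ""
      if col_num.contains i then
        if v == "?" then st
        else if j == 0 || maximo == "" || decide (maximo < v) then (v, maximo_veces)
        else st
      else if col_alfa.contains i then
        if v == "?" then st
        else
          let numero_veces : Int := (coli.count v : Int)
          if j == 0 || decide (maximo_veces < numero_veces) then (v, numero_veces)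
          else st
      else ("?", maximo_veces))
    ("", 0)

lemma pv_inner_eq (i : Int) (coli : List String) (col_num col_alfa : List Int) :
    (pvInner i coli col_num col_alfa).1 = pvAltCol i coli col_num col_alfa := by
  unfold pvInner pvAltCol
  by_cases hnum : col_num.contains i
  · simp only [hnum, if_true]
    cases coli with
    | nil => simp [PySem.List.pyRange, PySem.List.max?]
    | cons h t =>
      rw [PySem.List.pyRange_one_cons (by simp)]
      simp only [List.foldl_cons]
      rw [PySem.List.foldl_congr_mem _ _
        (fun (st : String × Int) j => pvNumBody st (PySem.List.pyGetD (h :: t) j "")) _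
        (by
          intro acc j hj
          have hj1 : 1 ≤ j := (PySem.List.mem_pyRange_one.mp hj).1
          have : (j == 0) = false := by simp; omega
          simp only [this, Bool.false_or, pvNumBody])]
      rw [PySem.List.foldl_pyRange_pyGetD' (h :: t) "" pvNumBody _ (by norm_num)]
      have hhead : (let maximo := (("", (0:Int)) : String × Int).1
          let maximo_veces := (("", (0:Int)) : String × Int).2
          let v := PySem.List.pyGetD (h :: t) 0 ""
          if v == "?" then (("", (0:Int)) : String × Int)
          else if (0:Int) == 0 || maximo == "" || decide (maximo < v) then (v, maximo_veces)
          else ("", 0)) = pvNumBody ("", 0) h := by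
        by_cases hq : h == "?" <;>
          simp [hq, pvNumBody, PySem.List.pyGetD_zero_cons]
      rw [hhead]
      show (List.foldl pvNumBody (pvNumBody ("", 0) h) t).1 = _
      rw [show List.foldl pvNumBody (pvNumBody ("", 0) h) t = List.foldl pvNumBody ("", 0) (h :: t) from (List.foldl_cons ..).symm]
      rw [pv_num_pair, pv_num_max]
  · simp only [hnum, Bool.false_eq_true, if_false]
    by_cases halfa : col_alfa.contains i
    · simp only [halfa, if_true]
      cases coli with
      | nil =>
        have hcat := pv_cat_eq []
        simp only [List.foldl_nil] at hcat
        rw [← hcat]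
        simp [PySem.List.pyRange]
      | cons h t =>
        rw [PySem.List.pyRange_one_cons (by simp)]
        simp only [List.foldl_cons]
        rw [PySem.List.foldl_congr_mem _ _
          (fun (st : String × Int) j => pvAlfaBody (h :: t) st (PySem.List.pyGetD (h :: t) j "")) _
          (by
            intro acc j hj
            have hj1 : 1 ≤ j := (PySem.List.mem_pyRange_one.mp hj).1
            have hj0 : (j == 0) = false := by simp; omega
            simp [hj0, pvAlfaBody])]
        rw [PySem.List.foldl_pyRange_pyGetD' (h :: t) "" (pvAlfaBody (h :: t)) _ (by norm_num)]
        have hhead : (let maximo := (("", (0:Int)) : String × Int).1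
            let maximo_veces := (("", (0:Int)) : String × Int).2
            let v := PySem.List.pyGetD (h :: t) 0 ""
            if v == "?" then (("", (0:Int)) : String × Int)
            else
              let numero_veces : Int := ((h :: t).count v : Int)
              if (0:Int) == 0 || decide (maximo_veces < numero_veces) then (v, numero_veces)
              else ("", 0)) = pvAlfaBody (h :: t) ("", 0) h := by
          by_cases hq : h == "?"
          · simp [hq, pvAlfaBody, PySem.List.pyGetD_zero_cons]
          · simp [hq, pvAlfaBody, PySem.List.pyGetD_zero_cons]
        rw [hhead]
        show (List.foldl (pvAlfaBody (h :: t)) (pvAlfaBody (h :: t) ("", 0) h) t).1 = _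
        rw [show List.foldl (pvAlfaBody (h :: t)) (pvAlfaBody (h :: t) ("", 0) h) t
            = List.foldl (pvAlfaBody (h :: t)) ("", 0) (h :: t) from (List.foldl_cons ..).symm]
        exact pv_cat_eq (h :: t)
    · simp only [halfa, Bool.false_eq_true, if_false]
      cases coli with
      | nil => simp [PySem.List.pyRange]
      | cons h t =>
        have key : ∀ (l : List Int) (st : String × Int), l ≠ [] →
            (l.foldl (fun (st : String × Int) (_ : Int) => ("?", st.2)) st) = ("?", st.2) := by
          intro l
          induction l with
          | nil => intro st hst; exact absurd rfl hst
          | cons a as ih =>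
            intro st _
            simp only [List.foldl_cons]
            cases as with
            | nil => rfl
            | cons b bs => exact ih ("?", st.2) (by simp)
        rw [key _ _ (by
          rw [PySem.List.pyRange_one_cons (by simp)]
          simp)]
        simp

-- ===== VERDICT (by name: the statement is the Claim_ definition above) =====
theorem maximo_mas_spec : Claim_equal_maximo_mas := by
  intro dicCol col_num col_alfa _
  show maximo_mas dicCol col_num col_alfa = maximo_mas_alt dicCol col_num col_alfa
  have hA : maximo_mas dicCol col_num col_alfa
      = (PySem.List.pyRange 0 (dicCol.length : Int) 1).foldl
          (fun res i => res ++ [(pvInner i (PySem.List.pyGetD dicCol i []) col_num col_alfa).1]) [] := rfl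
  have hB : maximo_mas_alt dicCol col_num col_alfa
      = (PySem.List.pyRange 0 (dicCol.length : Int) 1).foldl
          (fun res i => res ++ [pvAltCol i (PySem.List.pyGetD dicCol i []) col_num col_alfa]) [] := by
    unfold maximo_mas_alt
    rw [PySem.List.enumerate_eq_map_pyRange dicCol []]
    rw [List.foldl_map]
    simp
  rw [hA, hB]
  simp only [pv_inner_eq]
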